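-- pv_equiv track=rewrite | github.com/ConceptJunkie/rpn | rpnLexicographic.py | buildLimitedDigitNumbers
-- ===== SOURCE A (Python) =====
-- import itertools
--
-- def buildLimitedDigitNumbers( digits, minLength, maxLength ):
--     if minLength < 1:
--         raise ValueError( 'minimum length must be greater than 0' )
--
--     if  maxLength < minLength:
--         raise ValueError( 'maximum length must be greater than or equal to minimum length' )
--
--     for i in range( minLength, maxLength + 1 ):
--         for item in itertools.product( digits, repeat=i ):
--             number = ''
--
--             for digit in item:
--                 number += digit
--
--             yield number
-- ===== SOURCE B (Python) =====
-- def buildLimitedDigitNumbers(digits, minLength, maxLength):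
--     if minLength < 1:
--         raise ValueError('minimum length must be greater than 0')
--
--     if maxLength < minLength:
--         raise ValueError('maximum length must be greater than or equal to minimum length')
--
--     def gen(n):
--         if n == 0:
--             yield ''
--         else:
--             for d in digits:
--                 for suffix in gen(n - 1):
--                     yield d + suffix
--
--     for i in range(minLength, maxLength + 1):
--         yield from gen(i)
-- ===== Notes on version B (the rewrite author's own statement) =====
-- stated objective: simpler
-- what changed: Replaces itertools.product plus a tuple-joining inner loop with a recursive generator that builds each string directly as digit + shorter suffix.
import Mathlib
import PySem

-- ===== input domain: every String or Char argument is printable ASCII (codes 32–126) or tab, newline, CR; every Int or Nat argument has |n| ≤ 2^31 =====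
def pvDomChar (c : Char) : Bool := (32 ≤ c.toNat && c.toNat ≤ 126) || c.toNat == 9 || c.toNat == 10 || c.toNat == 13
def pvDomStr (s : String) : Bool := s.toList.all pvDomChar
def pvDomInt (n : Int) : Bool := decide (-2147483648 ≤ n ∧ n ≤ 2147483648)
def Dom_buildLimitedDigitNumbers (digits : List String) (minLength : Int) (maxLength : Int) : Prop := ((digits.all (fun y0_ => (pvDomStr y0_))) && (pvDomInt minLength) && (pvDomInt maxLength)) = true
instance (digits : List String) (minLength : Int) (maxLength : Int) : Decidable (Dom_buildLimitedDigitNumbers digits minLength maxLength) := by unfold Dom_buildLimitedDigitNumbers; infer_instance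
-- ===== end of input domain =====

-- B replaces itertools.product + the tuple-joining inner loop with a recursive generator
-- building each string directly as digit ++ shorter suffix (simpler decomposition, same cost).

-- ===== PORT A =====
-- itertools.product(digits, repeat=n), per its documented algorithm: start from [[]]
-- and repeat n times "extend every partial tuple on the right by each element of the pool".
def pyProduct (digits : List String) (n : Nat) : List (List String) :=
  (List.range n).foldl
    (fun acc _ => acc.flatMap (fun x => digits.map (fun y => x ++ [y]))) [[]]

-- the inner "number = ''; for digit in item: number += digit" loop
def joinDigits (item : List String) : String := item.foldl (· ++ ·) ""

-- generator materialised as the list of yielded values; on the two ValueError branches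
-- it yields nothing (those inputs are outside Pre_).
def buildLimitedDigitNumbers (digits : List String) (minLength : Int) (maxLength : Int) : List String :=
  if minLength < 1 then []
  else if maxLength < minLength then []
  else
    (PySem.List.pyRange minLength (maxLength + 1) 1).foldl
      (fun acc i => acc ++ (pyProduct digits i.toNat).map joinDigits) []

-- ===== PORT B =====
-- gen n: all strings of length n over digits, prefix digit first, leftmost outermost.
def genStrings (digits : List String) : Nat → List String
  | 0 => [""]
  | n + 1 => digits.flatMap (fun d => (genStrings digits n).map (fun s => d ++ s))

def buildLimitedDigitNumbers_alt (digits : List String) (minLength : Int) (maxLength : Int) : List String :=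
  if minLength < 1 then []
  else if maxLength < minLength then []
  else
    (PySem.List.pyRange minLength (maxLength + 1) 1).foldl
      (fun acc i => acc ++ genStrings digits i.toNat) []

-- ===== PRECONDITION & SPEC =====
-- Pre_ excludes exactly the inputs where A raises ValueError (minLength < 1 or maxLength < minLength).
def Pre_buildLimitedDigitNumbers (digits : List String) (minLength : Int) (maxLength : Int) : Prop :=
  1 ≤ minLength ∧ minLength ≤ maxLength
instance (digits : List String) (minLength : Int) (maxLength : Int) : Decidable (Pre_buildLimitedDigitNumbers digits minLength maxLength) := by unfold Pre_buildLimitedDigitNumbers; infer_instance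

def pvWitness_buildLimitedDigitNumbers : List String × Int × Int := (["0", "1"], 1, 2)

def Spec_buildLimitedDigitNumbers (digits : List String) (minLength : Int) (maxLength : Int) (out : List String) : Prop := out = buildLimitedDigitNumbers_alt digits minLength maxLength
instance (digits : List String) (minLength : Int) (maxLength : Int) (out : List String) : Decidable (Spec_buildLimitedDigitNumbers digits minLength maxLength out) := by unfold Spec_buildLimitedDigitNumbers; infer_instance

-- ===== CLAIM (what is proved, stated in full; the proofs are below) =====
def Claim_equal_buildLimitedDigitNumbers : Prop := ∀ (digits : List String) (minLength : Int) (maxLength : Int), Dom_buildLimitedDigitNumbers digits minLength maxLength → Pre_buildLimitedDigitNumbers digits minLength maxLength → Spec_buildLimitedDigitNumbers digits minLength maxLength (buildLimitedDigitNumbers digits minLength maxLength)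

-- ===== LEMMAS AND PROOFS =====

theorem foldl_str_append (xs : List String) (a : String) :
    xs.foldl (· ++ ·) a = a ++ xs.foldl (· ++ ·) "" := by
  induction xs generalizing a with
  | nil => simp [List.foldl]
  | cons x xs ih =>
      simp only [List.foldl]
      rw [ih (a ++ x), ih (("" : String) ++ x)]
      simp [String.append_assoc]

theorem joinDigits_cons (d : String) (xs : List String) :
    joinDigits (d :: xs) = d ++ joinDigits xs := by
  simp only [joinDigits, List.foldl]
  rw [foldl_str_append]
  simp

theorem pyProduct_succ (digits : List String) (n : Nat) :
    pyProduct digits (n + 1)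
      = (pyProduct digits n).flatMap (fun x => digits.map (fun y => x ++ [y])) := by
  simp [pyProduct, List.range_succ]

-- right-extension product can also be peeled at the front
theorem pyProduct_front (digits : List String) (n : Nat) :
    pyProduct digits (n + 1)
      = digits.flatMap (fun d => (pyProduct digits n).map (fun x => d :: x)) := by
  induction n with
  | zero =>
      simp [pyProduct, List.range_succ, List.flatMap]
      induction digits with
      | nil => simp
      | cons d ds ih => simp [ih]
  | succ n ih =>
      conv_lhs => rw [pyProduct_succ digits (n + 1), ih]
      conv_rhs => rw [pyProduct_succ digits n]
      simp [List.flatMap_assoc, List.map_flatMap, List.flatMap_map, List.map_map,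
            Function.comp_def, List.cons_append]

theorem map_join_pyProduct (digits : List String) (n : Nat) :
    (pyProduct digits n).map joinDigits = genStrings digits n := by
  induction n with
  | zero => simp [pyProduct, genStrings, joinDigits, List.foldl]
  | succ n ih =>
      rw [pyProduct_front, genStrings, ← ih]
      simp [List.map_flatMap, List.map_map, Function.comp_def, joinDigits_cons]

-- ===== VERDICT (by name: the statement is the Claim_ definition above) =====
theorem buildLimitedDigitNumbers_spec : Claim_equal_buildLimitedDigitNumbers := by
  intro digits minLength maxLength _ hpre
  obtain ⟨h1, h2⟩ := hpre
  unfold Spec_buildLimitedDigitNumbers buildLimitedDigitNumbers buildLimitedDigitNumbers_alt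
  rw [if_neg (by omega), if_neg (by omega), if_neg (by omega), if_neg (by omega)]
  have h : (fun (acc : List String) (i : Int) => acc ++ (pyProduct digits i.toNat).map joinDigits)
         = (fun (acc : List String) (i : Int) => acc ++ genStrings digits i.toNat) := by
    funext acc i
    rw [map_join_pyProduct]
  rw [h]
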